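-- pv_equiv track=rewrite | github.com/dhrumil2312/RNAWebsite_v2 | QLRNA/Extract_UBP.py | type_3_ubp
-- ===== SOURCE A (Python) =====
-- def type_3_ubp(dp):
--     ubp_info = []
--     i = 0
--     st_i = len(dp)
--     while i < len(dp):
--         if dp[i] == ")":
--             st_i = i
--         elif dp[i] == "(" and i > st_i:
--             ed_i = i
--             if ed_i > st_i + 1:
--                 ubp_info.append([st_i,ed_i])
--             st_i = len(dp)
--         i += 1
--     return ubp_info
-- ===== SOURCE B (Python) =====
-- def type_3_ubp(dp):
--     brackets = [(i, c) for i, c in enumerate(dp) if c in "()"]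
--     return [[p, q] for (p, a), (q, b) in zip(brackets, brackets[1:])
--             if a == ")" and b == "(" and q > p + 1]
-- ===== Notes on version B (the rewrite author's own statement) =====
-- stated objective: alternative
-- what changed: Replaced A's single-pass scalar state machine (carrying a last-close-bracket index with a sentinel reset) by a two-phase pass: first filter out the bracket positions, then emit a pair for each adjacent close-then-open bracket pair whose index gap exceeds one.
import Mathlib
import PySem

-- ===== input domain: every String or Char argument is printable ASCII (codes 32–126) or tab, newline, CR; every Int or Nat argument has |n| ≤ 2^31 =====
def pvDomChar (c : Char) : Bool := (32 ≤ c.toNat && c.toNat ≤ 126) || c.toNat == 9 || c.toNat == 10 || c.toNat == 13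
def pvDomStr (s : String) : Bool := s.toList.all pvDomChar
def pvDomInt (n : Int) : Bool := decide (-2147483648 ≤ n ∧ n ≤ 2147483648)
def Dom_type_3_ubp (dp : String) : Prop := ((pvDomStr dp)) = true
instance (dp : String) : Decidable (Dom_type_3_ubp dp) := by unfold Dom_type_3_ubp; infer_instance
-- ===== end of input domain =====

-- B replaces A's scalar state machine over the whole string by a two-phase pass
-- (filter bracket positions, then scan adjacent pairs); objective: alternative decomposition.

-- ===== PORT A =====
-- literal transliteration of A's while-loop: state = (st_i, ubp_info), i walks the indices
def type_3_ubp (dp : String) : List (List Int) :=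
  let n : Int := (dp.toList.length : Int)
  ((PySem.List.enumerate dp.toList).foldl
    (fun (s : Int × List (List Int)) (p : Int × Char) =>
      if p.2 == ')' then (p.1, s.2)
      else if p.2 == '(' && decide (p.1 > s.1) then
        (if decide (p.1 > s.1 + 1) then (n, s.2 ++ [[s.1, p.1]]) else (n, s.2))
      else s)
    (n, [])).2

-- ===== PORT B =====
-- literal transliteration of Source B: filter brackets, then comprehension over zip(brackets, brackets[1:])
def type_3_ubp_alt (dp : String) : List (List Int) :=
  let brackets := (PySem.List.enumerate dp.toList).filter (fun p => p.2 == ')' || p.2 == '(')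
  (brackets.zip brackets.tail).filterMap
    (fun pb => if pb.1.2 == ')' && pb.2.2 == '(' && decide (pb.2.1 > pb.1.1 + 1)
               then some [pb.1.1, pb.2.1] else none)

-- ===== PRECONDITION & SPEC =====
def Spec_type_3_ubp (dp : String) (out : List (List Int)) : Prop := out = type_3_ubp_alt dp
instance (dp : String) (out : List (List Int)) : Decidable (Spec_type_3_ubp dp out) := by unfold Spec_type_3_ubp; infer_instance

-- ===== CLAIM (what is proved, stated in full; the proofs are below) =====
def Claim_equal_type_3_ubp : Prop := ∀ (dp : String), Dom_type_3_ubp dp → Spec_type_3_ubp dp (type_3_ubp dp)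

-- ===== LEMMAS AND PROOFS =====

-- proof helpers: named versions of the two inline step functions, and an adjacent-pair scanner
def fA (n : Int) (s : Int × List (List Int)) (p : Int × Char) : Int × List (List Int) :=
  if p.2 == ')' then (p.1, s.2)
  else if p.2 == '(' && decide (p.1 > s.1) then
    (if decide (p.1 > s.1 + 1) then (n, s.2 ++ [[s.1, p.1]]) else (n, s.2))
  else s

def fB (pb : (Int × Char) × (Int × Char)) : Option (List Int) :=
  if pb.1.2 == ')' && pb.2.2 == '(' && decide (pb.2.1 > pb.1.1 + 1)
  then some [pb.1.1, pb.2.1] else none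

def isB (p : Int × Char) : Bool := p.2 == ')' || p.2 == '('

def bstep (p b : Int × Char) : List (List Int) :=
  if p.2 == ')' && b.2 == '(' && decide (b.1 > p.1 + 1) then [[p.1, b.1]] else []

def bscan : Option (Int × Char) → List (Int × Char) → List (List Int)
  | _, [] => []
  | none, b :: bs => bscan (some b) bs
  | some p, b :: bs => bstep p b ++ bscan (some b) bs

theorem zip_filterMap_eq_bscan (p : Int × Char) (bs : List (Int × Char)) :
    ((p :: bs).zip bs).filterMap fB = bscan (some p) bs := by
  induction bs generalizing p with
  | nil => rfl
  | cons b bs ih =>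
    show List.filterMap fB ((p, b) :: (b :: bs).zip bs) = bstep p b ++ bscan (some b) bs
    rw [List.filterMap_cons, ih b]
    by_cases h : (p.2 == ')' && b.2 == '(' && decide (b.1 > p.1 + 1)) = true
    · simp [fB, bstep, h]
    · simp [fB, bstep, h]

theorem alt_eq_bscan (dp : String) :
    type_3_ubp_alt dp
      = bscan none ((PySem.List.enumerate dp.toList).filter isB) := by
  show (((PySem.List.enumerate dp.toList).filter isB).zip
        ((PySem.List.enumerate dp.toList).filter isB).tail).filterMap fB
      = bscan none ((PySem.List.enumerate dp.toList).filter isB)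
  cases h : (PySem.List.enumerate dp.toList).filter isB with
  | nil => rfl
  | cons q qs => exact zip_filterMap_eq_bscan q qs

theorem bscan_open (j : Int) (bs : List (Int × Char)) :
    bscan (some (j, '(')) bs = bscan none bs := by
  cases bs with
  | nil => rfl
  | cons b bs => simp [bscan, bstep]

theorem foldA_eq_bscan (l : List (Int × Char)) (n : Int) (st : Int) (acc : List (List Int))
    (hidx : ∀ p ∈ l, p.1 < n)
    (hpw : l.Pairwise (fun a b => a.1 < b.1))
    (hst : st = n ∨ ∀ p ∈ l, st < p.1) :
    (l.foldl (fA n) (st, acc)).2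
      = acc ++ bscan (if st = n then none else some (st, ')')) (l.filter isB) := by
  induction l generalizing st acc with
  | nil => simp [bscan]
  | cons p l ih =>
    obtain ⟨i, c⟩ := p
    have hin : i < n := hidx (i, c) (by simp)
    have hlt : ∀ q ∈ l, i < q.1 := by
      intro q hq; exact (List.pairwise_cons.mp hpw).1 q hq
    have hidx' : ∀ p ∈ l, p.1 < n := fun q hq => hidx q (List.mem_cons_of_mem _ hq)
    have hpw' : l.Pairwise (fun a b => a.1 < b.1) := (List.pairwise_cons.mp hpw).2
    by_cases hc : c = ')'
    · subst hc
      have h1 : List.foldl (fA n) (st, acc) ((i, ')') :: l)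
          = List.foldl (fA n) (i, acc) l := by simp [fA]
      rw [h1, ih (i) acc hidx' hpw' (Or.inr hlt)]
      have hne : ¬ (i = n) := ne_of_lt hin
      simp only [hne, if_false]
      by_cases hst' : st = n
      · simp [hst', isB, bscan]
      · simp [hst', isB, bscan, bstep]
    · by_cases hc2 : c = '('
      · subst hc2
        by_cases hst' : st = n
        · subst hst'
          have hng : ¬ (i > st) := by omega
          have h1 : List.foldl (fA st) (st, acc) ((i, '(') :: l)
              = List.foldl (fA st) (st, acc) l := by simp [fA, hng]
          rw [h1, ih st acc hidx' hpw' (Or.inl rfl)]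
          simp [isB, bscan, bscan_open]
        · have hsti : st < i := (hst.resolve_left hst') (i, '(') (by simp)
          by_cases hgap : i > st + 1
          · have h1 : List.foldl (fA n) (st, acc) ((i, '(') :: l)
                = List.foldl (fA n) (n, acc ++ [[st, i]]) l := by
              simp [fA, hsti, hgap]
            rw [h1, ih n (acc ++ [[st, i]]) hidx' hpw' (Or.inl rfl)]
            simp [isB, bscan, bstep, bscan_open, hst', hgap]
          · have h1 : List.foldl (fA n) (st, acc) ((i, '(') :: l)
                = List.foldl (fA n) (n, acc) l := by
              simp [fA, hsti, hgap]
            rw [h1, ih n acc hidx' hpw' (Or.inl rfl)]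
            simp [isB, bscan, bstep, bscan_open, hst', hgap]
      · have h1 : List.foldl (fA n) (st, acc) ((i, c) :: l)
            = List.foldl (fA n) (st, acc) l := by
          simp [fA, hc, hc2]
        have h2 : ((i, c) :: l).filter isB = l.filter isB := by
          simp [isB, hc, hc2]
        rw [h1, h2, ih st acc hidx' hpw'
          (hst.imp id (fun h q hq => h q (List.mem_cons_of_mem _ hq)))]

-- ===== VERDICT (by name: the statement is the Claim_ definition above) =====
theorem type_3_ubp_spec : Claim_equal_type_3_ubp := by
  intro dp _
  show type_3_ubp dp = type_3_ubp_alt dp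
  have h0 : type_3_ubp dp
      = ((PySem.List.enumerate dp.toList).foldl (fA (dp.toList.length : Int))
          ((dp.toList.length : Int), [])).2 := rfl
  rw [h0, alt_eq_bscan,
    foldA_eq_bscan _ _ _ _ ?hidx ?hpw (Or.inl rfl)]
  · simp
  case hidx =>
    intro p hp
    obtain ⟨k, hk, rfl⟩ := (PySem.List.mem_enumerate_iff _ _ _).mp hp
    dsimp only
    omega
  case hpw => exact PySem.List.pairwise_lt_enumerate _ _
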